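-- pv_equiv track=rewrite | github.com/jwdj/EasyABC | simple_abc_parser.py | get_accidentals_for_key
-- ===== SOURCE A (Python) =====
-- key_data = \
--        {'c':  ('#', 0), 'am':  ('#', 0), 'ddor':   ('#', 0),
--         'f':  ('b', 1), 'dm':  ('b', 1), 'gdor':   ('#', 1),
--         'bb': ('b', 2), 'gm':  ('b', 2), 'cdor':   ('#', 2),
--         'eb': ('b', 3), 'cm':  ('b', 3), 'bbdor':  ('#', 3),
--         'ab': ('b', 4), 'fm':  ('b', 4), 'ebdor':  ('#', 4),
--         'db': ('b', 5), 'bbm': ('b', 5), 'abdor':  ('#', 5),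
--         'gb': ('b', 6), 'ebm': ('b', 6), 'abdor':  ('#', 6),
--         'cb': ('b', 7), 'abm': ('b', 7), 'dbdor':  ('#', 7),
--         'g':  ('#', 1), 'em':  ('#', 1), 'ador':   ('#', 0),
--         'd':  ('#', 2), 'bm':  ('#', 2), 'edor':   ('#', 0),
--         'a':  ('#', 3), 'f#m': ('#', 3), 'bdor':   ('#', 0),
--         'e':  ('#', 4), 'c#m': ('#', 4), 'f#dor':  ('#', 0),
--         'b':  ('#', 5), 'g#m': ('#', 5), 'c#dor':  ('#', 0),
--         'f#': ('#', 6), 'd#m': ('#', 6), 'g#dor':  ('#', 0),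
--         'c#': ('#', 7), 'a#m': ('#', 7), 'c#dor':  ('#', 0),}
--
-- def get_accidentals_for_key(key):
--     ''' returns a list of seven values corresponding to the notes in the C scale. 1 means #, -1 means b, and 0 means no change. '''
--     key = key.lower().strip().strip()
--     sharp_or_flat, number = key_data[key]
--     # initially no of the seven notes are flat or sharp (0=neutral)
--     accidentals = [0] * 7
--     # add accidentals
--     for i in range(number):
--         if sharp_or_flat == '#':
--             accidentals[(3 - 3*i) % 7] = 1
--         else:
--             accidentals[(6 + 3*i) % 7] = -1
--     return accidentals
-- ===== SOURCE B (Python) =====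
-- # Precomputed lookup table: each key maps directly to its finished accidentals list.
-- ACCIDENTALS = {
--     'c': [0, 0, 0, 0, 0, 0, 0],
--     'am': [0, 0, 0, 0, 0, 0, 0],
--     'ddor': [0, 0, 0, 0, 0, 0, 0],
--     'f': [0, 0, 0, 0, 0, 0, -1],
--     'dm': [0, 0, 0, 0, 0, 0, -1],
--     'gdor': [0, 0, 0, 1, 0, 0, 0],
--     'bb': [0, 0, -1, 0, 0, 0, -1],
--     'gm': [0, 0, -1, 0, 0, 0, -1],
--     'cdor': [1, 0, 0, 1, 0, 0, 0],
--     'eb': [0, 0, -1, 0, 0, -1, -1],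
--     'cm': [0, 0, -1, 0, 0, -1, -1],
--     'bbdor': [1, 0, 0, 1, 1, 0, 0],
--     'ab': [0, -1, -1, 0, 0, -1, -1],
--     'fm': [0, -1, -1, 0, 0, -1, -1],
--     'ebdor': [1, 1, 0, 1, 1, 0, 0],
--     'db': [0, -1, -1, 0, -1, -1, -1],
--     'bbm': [0, -1, -1, 0, -1, -1, -1],
--     'abdor': [1, 1, 1, 1, 1, 1, 0],
--     'gb': [-1, -1, -1, 0, -1, -1, -1],
--     'ebm': [-1, -1, -1, 0, -1, -1, -1],
--     'cb': [-1, -1, -1, -1, -1, -1, -1],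
--     'abm': [-1, -1, -1, -1, -1, -1, -1],
--     'dbdor': [1, 1, 1, 1, 1, 1, 1],
--     'g': [0, 0, 0, 1, 0, 0, 0],
--     'em': [0, 0, 0, 1, 0, 0, 0],
--     'ador': [0, 0, 0, 0, 0, 0, 0],
--     'd': [1, 0, 0, 1, 0, 0, 0],
--     'bm': [1, 0, 0, 1, 0, 0, 0],
--     'edor': [0, 0, 0, 0, 0, 0, 0],
--     'a': [1, 0, 0, 1, 1, 0, 0],
--     'f#m': [1, 0, 0, 1, 1, 0, 0],
--     'bdor': [0, 0, 0, 0, 0, 0, 0],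
--     'e': [1, 1, 0, 1, 1, 0, 0],
--     'c#m': [1, 1, 0, 1, 1, 0, 0],
--     'f#dor': [0, 0, 0, 0, 0, 0, 0],
--     'b': [1, 1, 0, 1, 1, 1, 0],
--     'g#m': [1, 1, 0, 1, 1, 1, 0],
--     'c#dor': [0, 0, 0, 0, 0, 0, 0],
--     'f#': [1, 1, 1, 1, 1, 1, 0],
--     'd#m': [1, 1, 1, 1, 1, 1, 0],
--     'g#dor': [0, 0, 0, 0, 0, 0, 0],
--     'c#': [1, 1, 1, 1, 1, 1, 1],
--     'a#m': [1, 1, 1, 1, 1, 1, 1],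
-- }
--
-- def get_accidentals_for_key(key):
--     ''' returns a list of seven values corresponding to the notes in the C scale. 1 means #, -1 means b, and 0 means no change. '''
--     return list(ACCIDENTALS[key.lower().strip()])
-- ===== Notes on version B (the rewrite author's own statement) =====
-- stated objective: simpler
-- what changed: A looks up a (sharp/flat, count) pair and fills the array in a modular-index loop; B replaces both the pair dict and the loop with one precomputed dict mapping each key straight to its accidentals list, so the function body is a single lookup.
import Mathlib
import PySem

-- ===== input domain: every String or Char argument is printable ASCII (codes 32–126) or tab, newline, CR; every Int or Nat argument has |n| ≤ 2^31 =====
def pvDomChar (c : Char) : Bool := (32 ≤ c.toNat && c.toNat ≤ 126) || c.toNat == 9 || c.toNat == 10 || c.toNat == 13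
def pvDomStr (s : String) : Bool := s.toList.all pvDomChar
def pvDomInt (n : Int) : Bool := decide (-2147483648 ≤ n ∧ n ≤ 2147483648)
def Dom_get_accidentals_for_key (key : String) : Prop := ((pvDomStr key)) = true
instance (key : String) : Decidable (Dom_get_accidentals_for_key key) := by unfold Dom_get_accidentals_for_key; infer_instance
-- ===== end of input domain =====

-- B replaces A's (sharp/flat, count) dict plus modular-index loop by one precomputed
-- dict mapping each key straight to its accidentals list (objective: simpler).

-- ===== PORT A =====
-- the module-level dict key_data; duplicate keys overwrite in place
def keyData : PySem.Dict String (String × Int) :=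
  PySem.Dict.ofList
    [("c", ("#", 0)), ("am", ("#", 0)), ("ddor", ("#", 0)),
     ("f", ("b", 1)), ("dm", ("b", 1)), ("gdor", ("#", 1)),
     ("bb", ("b", 2)), ("gm", ("b", 2)), ("cdor", ("#", 2)),
     ("eb", ("b", 3)), ("cm", ("b", 3)), ("bbdor", ("#", 3)),
     ("ab", ("b", 4)), ("fm", ("b", 4)), ("ebdor", ("#", 4)),
     ("db", ("b", 5)), ("bbm", ("b", 5)), ("abdor", ("#", 5)),
     ("gb", ("b", 6)), ("ebm", ("b", 6)), ("abdor", ("#", 6)),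
     ("cb", ("b", 7)), ("abm", ("b", 7)), ("dbdor", ("#", 7)),
     ("g", ("#", 1)), ("em", ("#", 1)), ("ador", ("#", 0)),
     ("d", ("#", 2)), ("bm", ("#", 2)), ("edor", ("#", 0)),
     ("a", ("#", 3)), ("f#m", ("#", 3)), ("bdor", ("#", 0)),
     ("e", ("#", 4)), ("c#m", ("#", 4)), ("f#dor", ("#", 0)),
     ("b", ("#", 5)), ("g#m", ("#", 5)), ("c#dor", ("#", 0)),
     ("f#", ("#", 6)), ("d#m", ("#", 6)), ("g#dor", ("#", 0)),
     ("c#", ("#", 7)), ("a#m", ("#", 7)), ("c#dor", ("#", 0))]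

-- A after the key normalisation: pair lookup then the modular-index loop
def getAccCoreA (k : String) : List Int :=
  match keyData.get? k with
  | none => []      -- Python raises KeyError here; excluded by Pre_
  | some (sharp_or_flat, number) =>
      (PySem.List.pyRange 0 number 1).foldl
        (fun accidentals i =>
          if sharp_or_flat == "#" then
            PySem.List.pySetD accidentals (PySem.Int.mod (3 - 3 * i) 7) 1
          else
            PySem.List.pySetD accidentals (PySem.Int.mod (6 + 3 * i) 7) (-1))
        (List.replicate 7 (0 : Int))

def get_accidentals_for_key (key : String) : List Int :=
  getAccCoreA (PySem.Str.strip (PySem.Str.strip (PySem.Str.lower key)))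

-- ===== PORT B =====
-- the module-level precomputed dict ACCIDENTALS: key -> finished accidentals list
def accidentalsTable : PySem.Dict String (List Int) :=
  PySem.Dict.ofList
    [("c", [0, 0, 0, 0, 0, 0, 0]),
     ("am", [0, 0, 0, 0, 0, 0, 0]),
     ("ddor", [0, 0, 0, 0, 0, 0, 0]),
     ("f", [0, 0, 0, 0, 0, 0, -1]),
     ("dm", [0, 0, 0, 0, 0, 0, -1]),
     ("gdor", [0, 0, 0, 1, 0, 0, 0]),
     ("bb", [0, 0, -1, 0, 0, 0, -1]),
     ("gm", [0, 0, -1, 0, 0, 0, -1]),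
     ("cdor", [1, 0, 0, 1, 0, 0, 0]),
     ("eb", [0, 0, -1, 0, 0, -1, -1]),
     ("cm", [0, 0, -1, 0, 0, -1, -1]),
     ("bbdor", [1, 0, 0, 1, 1, 0, 0]),
     ("ab", [0, -1, -1, 0, 0, -1, -1]),
     ("fm", [0, -1, -1, 0, 0, -1, -1]),
     ("ebdor", [1, 1, 0, 1, 1, 0, 0]),
     ("db", [0, -1, -1, 0, -1, -1, -1]),
     ("bbm", [0, -1, -1, 0, -1, -1, -1]),
     ("abdor", [1, 1, 1, 1, 1, 1, 0]),
     ("gb", [-1, -1, -1, 0, -1, -1, -1]),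
     ("ebm", [-1, -1, -1, 0, -1, -1, -1]),
     ("cb", [-1, -1, -1, -1, -1, -1, -1]),
     ("abm", [-1, -1, -1, -1, -1, -1, -1]),
     ("dbdor", [1, 1, 1, 1, 1, 1, 1]),
     ("g", [0, 0, 0, 1, 0, 0, 0]),
     ("em", [0, 0, 0, 1, 0, 0, 0]),
     ("ador", [0, 0, 0, 0, 0, 0, 0]),
     ("d", [1, 0, 0, 1, 0, 0, 0]),
     ("bm", [1, 0, 0, 1, 0, 0, 0]),
     ("edor", [0, 0, 0, 0, 0, 0, 0]),
     ("a", [1, 0, 0, 1, 1, 0, 0]),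
     ("f#m", [1, 0, 0, 1, 1, 0, 0]),
     ("bdor", [0, 0, 0, 0, 0, 0, 0]),
     ("e", [1, 1, 0, 1, 1, 0, 0]),
     ("c#m", [1, 1, 0, 1, 1, 0, 0]),
     ("f#dor", [0, 0, 0, 0, 0, 0, 0]),
     ("b", [1, 1, 0, 1, 1, 1, 0]),
     ("g#m", [1, 1, 0, 1, 1, 1, 0]),
     ("c#dor", [0, 0, 0, 0, 0, 0, 0]),
     ("f#", [1, 1, 1, 1, 1, 1, 0]),
     ("d#m", [1, 1, 1, 1, 1, 1, 0]),
     ("g#dor", [0, 0, 0, 0, 0, 0, 0]),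
     ("c#", [1, 1, 1, 1, 1, 1, 1]),
     ("a#m", [1, 1, 1, 1, 1, 1, 1])]

-- B's table lookup: ACCIDENTALS[k]
def getAccCoreB (k : String) : List Int :=
  match accidentalsTable.get? k with
  | none => []      -- Python raises KeyError here; excluded by Pre_
  | some acc => acc

-- B: 'list(ACCIDENTALS[key.lower().strip()])' — one lookup (list() copies; value identity is irrelevant here)
def get_accidentals_for_key_alt (key : String) : List Int :=
  getAccCoreB (PySem.Str.strip (PySem.Str.lower key))

-- ===== PRECONDITION & SPEC =====
-- Pre_ excludes exactly the keys absent from key_data, on which Python A raises KeyError.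
-- keyList = the distinct keys of key_data
def keyList : List String :=
  ["c", "am", "ddor", "f", "dm", "gdor", "bb", "gm", "cdor", "eb", "cm", "bbdor",
   "ab", "fm", "ebdor", "db", "bbm", "abdor", "gb", "ebm", "cb", "abm", "dbdor",
   "g", "em", "ador", "d", "bm", "edor", "a", "f#m", "bdor", "e", "c#m", "f#dor",
   "b", "g#m", "c#dor", "f#", "d#m", "g#dor", "c#", "a#m"]
def Pre_get_accidentals_for_key (key : String) : Prop :=
  PySem.Str.strip (PySem.Str.lower key) ∈ keyList
instance (key : String) : Decidable (Pre_get_accidentals_for_key key) := by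
  unfold Pre_get_accidentals_for_key; infer_instance
def pvWitness_get_accidentals_for_key : String := "Em"
def Spec_get_accidentals_for_key (key : String) (out : List Int) : Prop := out = get_accidentals_for_key_alt key
instance (key : String) (out : List Int) : Decidable (Spec_get_accidentals_for_key key out) := by unfold Spec_get_accidentals_for_key; infer_instance

-- ===== CLAIM (what is proved, stated in full; the proofs are below) =====
def Claim_equal_get_accidentals_for_key : Prop := ∀ (key : String), Dom_get_accidentals_for_key key → Pre_get_accidentals_for_key key → Spec_get_accidentals_for_key key (get_accidentals_for_key key)

-- ===== LEMMAS AND PROOFS =====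
-- dropWhile is idempotent
lemma dw_idem {α : Type} (p : α → Bool) (l : List α) :
    List.dropWhile p (List.dropWhile p l) = List.dropWhile p l := by
  induction l with
  | nil => simp
  | cons a t ih =>
      by_cases h : p a = true <;> simp [h, ih]

-- a fixed point of dropWhile stays fixed on each of its prefixes
lemma dw_prefix {α : Type} {p : α → Bool} {l l' : List α}
    (h : List.dropWhile p l = l) (hp : l' <+: l) : List.dropWhile p l' = l' := by
  cases l' with
  | nil => simp
  | cons a t =>
      obtain ⟨r, hr⟩ := hp
      have hpa : p a = false := by
        by_contra hne
        have hpa : p a = true := by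
          cases hx : p a
          · exact absurd hx hne
          · rfl
        rw [← hr, List.cons_append, List.dropWhile_cons, hpa, if_pos rfl] at h
        have hle := List.length_dropWhile_le p (t ++ r)
        rw [h] at hle
        simp at hle
      simp [hpa]

-- Python's strip is idempotent (char-list level)
lemma chars_strip_strip (l : List Char) :
    PySem.Chars.strip (PySem.Chars.strip l) = PySem.Chars.strip l := by
  show PySem.Chars.rstrip (PySem.Chars.lstrip (PySem.Chars.rstrip (PySem.Chars.lstrip l)))
      = PySem.Chars.rstrip (PySem.Chars.lstrip l)
  have h1 : PySem.Chars.lstrip (PySem.Chars.rstrip (PySem.Chars.lstrip l))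
      = PySem.Chars.rstrip (PySem.Chars.lstrip l) := by
    apply dw_prefix (dw_idem PySem.Chars.isspace l)
    show (List.dropWhile PySem.Chars.isspace (List.dropWhile PySem.Chars.isspace l).reverse).reverse
        <+: List.dropWhile PySem.Chars.isspace l
    rw [← List.reverse_reverse (List.dropWhile PySem.Chars.isspace l), List.reverse_prefix,
        List.reverse_reverse]
    exact List.dropWhile_suffix _
  rw [h1]
  show (List.dropWhile PySem.Chars.isspace
      (List.dropWhile PySem.Chars.isspace (List.dropWhile PySem.Chars.isspace l).reverse).reverse.reverse).reverse
      = _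
  rw [List.reverse_reverse, dw_idem]
  rfl

-- Python's strip is idempotent, so A's double strip equals B's single strip
lemma strip_strip (s : String) :
    PySem.Str.strip (PySem.Str.strip s) = PySem.Str.strip s := by
  show String.ofList (PySem.Chars.strip (PySem.Str.strip s).toList) = _
  rw [PySem.Str.toList_strip, chars_strip_strip]
  rfl

-- on every key of key_data, A's loop result equals B's table entry (finite check)
set_option maxRecDepth 4000000 in
lemma core_eq : ∀ k ∈ keyList, getAccCoreA k = getAccCoreB k := by decide

-- ===== VERDICT (by name: the statement is the Claim_ definition above) =====
theorem get_accidentals_for_key_spec : Claim_equal_get_accidentals_for_key := by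
  intro key _ hpre
  unfold Pre_get_accidentals_for_key at hpre
  unfold Spec_get_accidentals_for_key get_accidentals_for_key get_accidentals_for_key_alt
  rw [strip_strip]
  exact core_eq _ hpre
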